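-- pv_equiv track=rewrite | github.com/UPstartDeveloper/Problem_Solving_Practice | array_str_problems/evaluating_student_grades.py | is_diploma_candidate
-- ===== SOURCE A (Python) =====
-- def is_diploma_candidate(grades: str) -> bool:
--     """Solution is O(n) time, O(1) space"""
--     ### HELPER
--     def _find_longest(grades):
--         """find out the length of the longest sequence of consecutive D's"""
--         index1, longest_length = 0, 0
--         while index1 < len(grades) - 1:
--             move_fwd = 0
--             if grades[index1] != 'D':
--                 move_fwd = 1
--             else:  # grades[index1] == 'D'
--                 local_length, first_ndx = 1, index1
--                 while (
--                     first_ndx < len(grades) - 1 and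
--                     grades[first_ndx] == 'D' and
--                     grades[first_ndx + 1] == 'D'
--                 ):
--                     local_length += 1
--                     first_ndx += 1
--                 longest_length = max(longest_length, local_length)
--                 move_fwd = first_ndx + 1 - index1
--             index1 += move_fwd
--         return longest_length
--
--     ### MAIN
--     grades = grades.upper()
--     num_ds_overall = ndo = grades.count('D')
--     num_fs_overall = nfo = grades.count('F')
--     longest_consecutive_ds = lcd = _find_longest(grades)
--     return (
--         ndo < 5 and nfo < 2 and lcd <= 3
--     )
-- ===== SOURCE B (Python) =====
-- def is_diploma_candidate(grades: str) -> bool: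
--     """Single pass: count D's, F's and the longest consecutive-D run in one loop."""
--     num_d = num_f = run = longest = 0
--     for c in grades.upper():
--         if c == 'D':
--             num_d += 1
--             run += 1
--             if run > longest:
--                 longest = run
--         else:
--             run = 0
--         if c == 'F':
--             num_f += 1
--     return num_d < 5 and num_f < 2 and longest <= 3
-- ===== Notes on version B (the rewrite author's own statement) =====
-- stated objective: simpler
-- what changed: B replaces A's two .count passes plus a separate index-jumping run-finding helper (with nested while loops) by one linear pass over the characters that maintains the D-count, F-count, current run and longest run together.
import Mathlib
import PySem

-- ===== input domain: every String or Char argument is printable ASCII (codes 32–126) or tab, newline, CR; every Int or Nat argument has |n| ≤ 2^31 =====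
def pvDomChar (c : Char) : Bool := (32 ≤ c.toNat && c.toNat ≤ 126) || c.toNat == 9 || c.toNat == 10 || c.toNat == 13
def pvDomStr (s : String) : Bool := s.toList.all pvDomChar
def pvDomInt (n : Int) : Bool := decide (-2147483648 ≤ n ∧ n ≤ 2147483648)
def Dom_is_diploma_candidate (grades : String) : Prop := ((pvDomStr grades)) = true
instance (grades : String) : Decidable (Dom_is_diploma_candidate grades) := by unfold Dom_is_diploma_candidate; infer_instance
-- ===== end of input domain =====

-- B does in ONE loop what A does with two .count calls plus a nested-while run finder (simpler; a timing run measured it faster by a constant factor); return values proved equal on all inputs.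

-- ===== PORT A =====
-- Inner while loop of A's helper _find_longest: state (local_length, first_ndx).
-- The while loops are ported with a fuel counter (len(grades) steps always suffice,
-- since the index advances by at least 1 per iteration); all Python string indexings
-- are guarded by the loop conditions (index < len-1), so `getD` with a dummy default
-- is exact for them.
def pvInner (l : List Char) : Nat → Nat → Nat → Nat × Nat
  | 0, localLen, firstNdx => (localLen, firstNdx)
  | fuel + 1, localLen, firstNdx =>
    if firstNdx < l.length - 1 ∧ l.getD firstNdx ' ' = 'D' ∧ l.getD (firstNdx + 1) ' ' = 'D' then
      pvInner l fuel (localLen + 1) (firstNdx + 1)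
    else (localLen, firstNdx)

-- Outer while loop of _find_longest: state (index1, longest_length); index1 += move_fwd.
def pvOuter (l : List Char) : Nat → Nat → Nat → Nat
  | 0, _, longest => longest
  | fuel + 1, index1, longest =>
    if index1 < l.length - 1 then
      if l.getD index1 ' ' ≠ 'D' then
        pvOuter l fuel (index1 + 1) longest            -- move_fwd = 1
      else
        let p := pvInner l l.length 1 index1           -- local_length = 1, first_ndx = index1
        pvOuter l fuel (p.2 + 1) (max longest p.1)     -- move_fwd = first_ndx + 1 - index1
    else longest

def is_diploma_candidate (grades : String) : Bool :=
  let g := PySem.Str.upper grades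
  let ndo := PySem.Str.count g "D"
  let nfo := PySem.Str.count g "F"
  let lcd := pvOuter g.toList g.toList.length 0 0
  decide (ndo < 5) && decide (nfo < 2) && decide (lcd ≤ 3)

-- ===== PORT B =====
-- Source B's single for-loop, state (num_d, num_f, run, longest).
def pvScan : List Char → Nat → Nat → Nat → Nat → Nat × Nat × Nat × Nat
  | [], numD, numF, run, longest => (numD, numF, run, longest)
  | c :: t, numD, numF, run, longest =>
    if c = 'D' then
      let run' := run + 1
      let longest' := if run' > longest then run' else longest
      let numF' := if c = 'F' then numF + 1 else numF
      pvScan t (numD + 1) numF' run' longest'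
    else
      let numF' := if c = 'F' then numF + 1 else numF
      pvScan t numD numF' 0 longest

def is_diploma_candidate_alt (grades : String) : Bool :=
  let r := pvScan (PySem.Str.upper grades).toList 0 0 0 0
  decide (r.1 < 5) && decide (r.2.1 < 2) && decide (r.2.2.2 ≤ 3)

-- ===== PRECONDITION & SPEC =====
def Spec_is_diploma_candidate (grades : String) (out : Bool) : Prop := out = is_diploma_candidate_alt grades
instance (grades : String) (out : Bool) : Decidable (Spec_is_diploma_candidate grades out) := by unfold Spec_is_diploma_candidate; infer_instance

-- ===== CLAIM (what is proved, stated in full; the proofs are below) =====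
def Claim_equal_is_diploma_candidate : Prop := ∀ (grades : String), Dom_is_diploma_candidate grades → Spec_is_diploma_candidate grades (is_diploma_candidate grades)

-- ===== LEMMAS AND PROOFS =====

-- length of the leading run of 'D's
def pvRun : List Char → Nat
  | [] => 0
  | c :: t => if c = 'D' then pvRun t + 1 else 0

-- longest-run component of B's loop, isolated
def pvLong : List Char → Nat → Nat → Nat
  | [], _, longest => longest
  | c :: t, run, longest =>
    if c = 'D' then pvLong t (run + 1) (max longest (run + 1))
    else pvLong t 0 longest

theorem pvRun_cons_D (t : List Char) : pvRun ('D' :: t) = pvRun t + 1 := by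
  simp [pvRun]

theorem pvRun_drop_head (s : List Char) (h : pvRun s < s.length) :
    s.getD (pvRun s) ' ' ≠ 'D' := by
  induction s with
  | nil => simp at h
  | cons c t ih =>
    by_cases hc : c = 'D'
    · subst hc
      rw [pvRun_cons_D] at h ⊢
      rw [List.getD_cons_succ]
      exact ih (by simpa using h)
    · simpa [pvRun, hc] using hc

-- count component of B's loop
theorem pvScan_fst (t : List Char) : ∀ numD numF run longest,
    (pvScan t numD numF run longest).1 = numD + t.count 'D' := by
  induction t with
  | nil => simp [pvScan]
  | cons c t ih =>
    intro numD numF run longest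
    by_cases hD : c = 'D' <;>
      simp [pvScan, hD, ih, List.count_cons] <;> omega

theorem pvScan_snd (t : List Char) : ∀ numD numF run longest,
    (pvScan t numD numF run longest).2.1 = numF + t.count 'F' := by
  induction t with
  | nil => simp [pvScan]
  | cons c t ih =>
    intro numD numF run longest
    by_cases hD : c = 'D' <;> by_cases hF : c = 'F' <;>
      simp [pvScan, hD, hF, ih, List.count_cons] <;> omega

theorem pvScan_long (t : List Char) : ∀ numD numF run longest,
    (pvScan t numD numF run longest).2.2.2 = pvLong t run longest := by
  induction t with
  | nil => simp [pvScan, pvLong]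
  | cons c t ih =>
    intro numD numF run longest
    by_cases hD : c = 'D' <;> simp [pvScan, pvLong, hD, ih]
    congr 1
    split <;> omega

-- cons-step equations for pvLong (stated once so later rewrites need no ifs)
theorem pvLong_cons_D (t : List Char) (run longest : Nat) :
    pvLong ('D' :: t) run longest = pvLong t (run + 1) (max longest (run + 1)) := by
  simp [pvLong]

theorem pvLong_cons_ne (c : Char) (t : List Char) (run longest : Nat) (hc : c ≠ 'D') :
    pvLong (c :: t) run longest = pvLong t 0 longest := by
  simp [pvLong, hc]

-- consuming a whole leading run of 'D's in one step of pvLong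
theorem pvLong_run (s : List Char) : ∀ run longest, 1 ≤ pvRun s →
    pvLong s run longest
      = pvLong (s.drop (pvRun s)) (run + pvRun s) (max longest (run + pvRun s)) := by
  induction s with
  | nil => simp [pvRun]
  | cons c t ih =>
    intro run longest hr
    have hc : c = 'D' := by by_contra hc; simp [pvRun, hc] at hr
    subst hc
    rw [pvRun_cons_D, pvLong_cons_D]
    have hd : List.drop (pvRun t + 1) ('D' :: t) = List.drop (pvRun t) t := by simp
    rw [hd]
    by_cases ht : 1 ≤ pvRun t
    · rw [ih (run + 1) (max longest (run + 1)) ht]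
      congr 1
      · omega
      · omega
    · have ht0 : pvRun t = 0 := by omega
      rw [ht0]
      simp

theorem pvLong_head_not_D (s : List Char) (run longest : Nat)
    (h : s.getD 0 ' ' ≠ 'D') : pvLong s run longest = pvLong s 0 longest := by
  cases s with
  | nil => simp [pvLong]
  | cons c t =>
    simp only [List.getD_cons_zero] at h
    rw [pvLong_cons_ne c t run longest h, pvLong_cons_ne c t 0 longest h]

-- characterization of A's inner loop: with enough fuel it measures the leading run
-- of 'D's starting at firstNdx
theorem pvInner_eq (l : List Char) : ∀ (fuel localLen firstNdx : Nat),
    l.length - 1 - firstNdx ≤ fuel → firstNdx < l.length → l.getD firstNdx ' ' = 'D' →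
    pvInner l fuel localLen firstNdx
      = (localLen + (pvRun (l.drop firstNdx) - 1), firstNdx + (pvRun (l.drop firstNdx) - 1)) := by
  intro fuel
  induction fuel with
  | zero =>
    intro localLen firstNdx hfuel hi hD
    have hlast : firstNdx = l.length - 1 := by omega
    have hdrop : l.drop firstNdx = l.getD firstNdx ' ' :: l.drop (firstNdx + 1) := by
      rw [List.getD_eq_getElem l ' ' hi]
      exact List.drop_eq_getElem_cons hi
    have hnil : l.drop (firstNdx + 1) = [] := List.drop_eq_nil_of_le (by omega)
    have hrun1 : pvRun (l.drop firstNdx) = 1 := by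
      rw [hdrop, hD, hnil, pvRun_cons_D]
      simp [pvRun]
    simp [pvInner, hrun1]
  | succ n ih =>
    intro localLen firstNdx hfuel hi hD
    have hdrop : l.drop firstNdx = l.getD firstNdx ' ' :: l.drop (firstNdx + 1) := by
      rw [List.getD_eq_getElem l ' ' hi]
      exact List.drop_eq_getElem_cons hi
    rw [pvInner]
    split
    · rename_i h
      obtain ⟨h1, _, h3⟩ := h
      have hi2 : firstNdx + 1 < l.length := by omega
      have hrun : pvRun (l.drop firstNdx) = pvRun (l.drop (firstNdx + 1)) + 1 := by
        rw [hdrop, hD, pvRun_cons_D]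
      have hdrop2 : l.drop (firstNdx + 1) = l.getD (firstNdx + 1) ' ' :: l.drop (firstNdx + 2) := by
        rw [List.getD_eq_getElem l ' ' hi2]
        exact List.drop_eq_getElem_cons hi2
      have hrun2 : 1 ≤ pvRun (l.drop (firstNdx + 1)) := by
        rw [hdrop2, h3, pvRun_cons_D]; omega
      rw [ih (localLen + 1) (firstNdx + 1) (by omega) hi2 h3, hrun]
      simp only [Prod.mk.injEq]
      omega
    · rename_i h
      have hrun1 : pvRun (l.drop firstNdx) = 1 := by
        by_cases h1 : firstNdx + 1 < l.length
        · have h3 : l.getD (firstNdx + 1) ' ' ≠ 'D' := by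
            intro hc; exact h ⟨by omega, hD, hc⟩
          have hdrop2 : l.drop (firstNdx + 1) = l.getD (firstNdx + 1) ' ' :: l.drop (firstNdx + 2) := by
            rw [List.getD_eq_getElem l ' ' h1]
            exact List.drop_eq_getElem_cons h1
          have hz : pvRun (l.getD (firstNdx + 1) ' ' :: l.drop (firstNdx + 2)) = 0 := by
            simp only [pvRun, if_neg h3]
          rw [hdrop, hD, hdrop2, pvRun_cons_D, hz]
        · have hnil : l.drop (firstNdx + 1) = [] := List.drop_eq_nil_of_le (by omega)
          rw [hdrop, hD, hnil, pvRun_cons_D]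
          simp [pvRun]
      simp [hrun1]

-- terminal states: at most one character left, so at most a lone trailing 'D'
theorem pvTail (l : List Char) (i longest : Nat) (hlen : (l.drop i).length ≤ 1) :
    pvLong (l.drop i) 0 longest = longest
    ∨ pvLong (l.drop i) 0 longest = max longest 1 := by
  match hd : l.drop i with
  | [] => left; simp [pvLong]
  | [c] =>
    by_cases hc : c = 'D'
    · right; simp [pvLong, hc]
    · left; simp [pvLong, hc]
  | c :: d :: t => rw [hd] at hlen; simp at hlen

-- MAIN BRIDGE: from any outer-loop state (with enough fuel), B's longest over the
-- remaining suffix equals A's outer-loop result, except possibly for a lone trailing 'D'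
-- (run of length 1 at the very last index), which A's helper never examines: then B's
-- value is max (A's value) 1.
theorem pvMain (l : List Char) : ∀ (fuel i longest : Nat), l.length - 1 - i ≤ fuel →
    pvLong (l.drop i) 0 longest = pvOuter l fuel i longest
    ∨ pvLong (l.drop i) 0 longest = max (pvOuter l fuel i longest) 1 := by
  intro fuel
  induction fuel with
  | zero =>
    intro i longest hfuel
    have hlen : (l.drop i).length ≤ 1 := by simp only [List.length_drop]; omega
    exact pvTail l i longest hlen
  | succ n ih =>
    intro i longest hfuel
    rw [pvOuter]
    split
    · rename_i h
      have hi : i < l.length := by omega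
      have hdrop : l.drop i = l.getD i ' ' :: l.drop (i + 1) := by
        rw [List.getD_eq_getElem l ' ' hi]
        exact List.drop_eq_getElem_cons hi
      split
      · rename_i hD
        have hx : pvLong (l.drop i) 0 longest = pvLong (l.drop (i + 1)) 0 longest := by
          rw [hdrop, pvLong_cons_ne _ _ _ _ hD]
        rw [hx]
        exact ih (i + 1) longest (by omega)
      · rename_i hD
        rw [not_not] at hD
        have hr1 : 1 ≤ pvRun (l.drop i) := by rw [hdrop, hD, pvRun_cons_D]; omega
        have hinner := pvInner_eq l l.length 1 i (by omega) hi hD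
        have hnotD : (l.drop (i + pvRun (l.drop i))).getD 0 ' ' ≠ 'D' := by
          by_cases hlt : pvRun (l.drop i) < (l.drop i).length
          · have h' := pvRun_drop_head (l.drop i) hlt
            have e1 : (l.drop i).getD (pvRun (l.drop i)) ' '
                = (l.drop (i + pvRun (l.drop i))).getD 0 ' ' := by
              simp [List.getD_eq_getElem?_getD, List.getElem?_drop]
            rwa [e1] at h'
          · have hnil : l.drop (i + pvRun (l.drop i)) = [] := by
              apply List.drop_eq_nil_of_le
              simp only [List.length_drop] at hlt
              omega
            rw [hnil]
            simp
        have hstep : pvLong (l.drop i) 0 longest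
            = pvLong (l.drop (i + pvRun (l.drop i))) 0 (max longest (pvRun (l.drop i))) := by
          rw [pvLong_run (l.drop i) 0 longest hr1, List.drop_drop, Nat.zero_add]
          exact pvLong_head_not_D _ _ _ hnotD
        have hsnd : (pvInner l l.length 1 i).2 = i + (pvRun (l.drop i) - 1) := by rw [hinner]
        have hfst : (pvInner l l.length 1 i).1 = 1 + (pvRun (l.drop i) - 1) := by rw [hinner]
        have h2 : (pvInner l l.length 1 i).2 + 1 = i + pvRun (l.drop i) := by rw [hsnd]; omega
        have h1' : max longest (pvInner l l.length 1 i).1 = max longest (pvRun (l.drop i)) := by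
          rw [hfst]; omega
        rw [hstep]
        simp only [h2, h1']
        exact ih (i + pvRun (l.drop i)) (max longest (pvRun (l.drop i))) (by omega)
    · rename_i h
      have hlen : (l.drop i).length ≤ 1 := by simp only [List.length_drop]; omega
      exact pvTail l i longest hlen

-- single-character Str.count is List.count
theorem pvCountGo_single (c : Char) : ∀ (fuel : Nat) (l : List Char) (acc : Nat),
    l.length ≤ fuel → PySem.Chars.count.go [c] fuel l acc = acc + l.count c := by
  intro fuel
  induction fuel with
  | zero =>
    intro l acc h
    have hl : l = [] := by cases l <;> simp_all
    subst hl
    simp [PySem.Chars.count.go]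
  | succ n ih =>
    intro l acc h
    cases l with
    | nil => simp [PySem.Chars.count.go]
    | cons x t =>
      rw [PySem.Chars.count.go]
      simp only [List.length_cons] at h
      by_cases hx : c = x
      · have hp : List.isPrefixOf [c] (x :: t) = true := by simp [List.isPrefixOf, hx]
        rw [if_pos hp]
        have hd1 : List.drop [c].length (x :: t) = t := by simp
        rw [hd1, ih t (acc + 1) (by omega)]
        have : List.count c (x :: t) = List.count c t + 1 := by
          simp [List.count_cons, hx]
        rw [this]
        omega
      · have hx' : ¬ x = c := fun hh => hx hh.symm
        have hp : List.isPrefixOf [c] (x :: t) = false := by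
          simp [List.isPrefixOf]
          exact hx
        rw [if_neg (by simp [hp])]
        rw [ih t acc (by omega)]
        have : List.count c (x :: t) = List.count c t := by
          simp [List.count_cons, hx, hx']
        rw [this]

theorem pvCount_single (s : List Char) (c : Char) :
    PySem.Chars.count s [c] = s.count c := by
  rw [PySem.Chars.count, if_neg (by simp)]
  rw [pvCountGo_single c s.length s 0 le_rfl]
  omega

-- ===== VERDICT (by name: the statement is the Claim_ definition above) =====
theorem is_diploma_candidate_spec : Claim_equal_is_diploma_candidate := by
  intro grades _
  unfold Spec_is_diploma_candidate is_diploma_candidate is_diploma_candidate_alt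
  have hD : PySem.Str.count (PySem.Str.upper grades) "D"
      = ((PySem.Str.upper grades).toList).count 'D' := by
    rw [PySem.Str.count_eq, show ("D" : String).toList = ['D'] from rfl, pvCount_single]
  have hF : PySem.Str.count (PySem.Str.upper grades) "F"
      = ((PySem.Str.upper grades).toList).count 'F' := by
    rw [PySem.Str.count_eq, show ("F" : String).toList = ['F'] from rfl, pvCount_single]
  have h1 := pvScan_fst (PySem.Str.upper grades).toList 0 0 0 0
  have h2 := pvScan_snd (PySem.Str.upper grades).toList 0 0 0 0
  have h3 := pvScan_long (PySem.Str.upper grades).toList 0 0 0 0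
  have hmain := pvMain (PySem.Str.upper grades).toList
      (PySem.Str.upper grades).toList.length 0 0 (by omega)
  rw [List.drop_zero] at hmain
  have b1 : decide (PySem.Str.count (PySem.Str.upper grades) "D" < 5)
      = decide ((pvScan (PySem.Str.upper grades).toList 0 0 0 0).1 < 5) := by
    rw [decide_eq_decide, hD, h1]
    omega
  have b2 : decide (PySem.Str.count (PySem.Str.upper grades) "F" < 2)
      = decide ((pvScan (PySem.Str.upper grades).toList 0 0 0 0).2.1 < 2) := by
    rw [decide_eq_decide, hF, h2]
    omega
  have b3 : decide (pvOuter (PySem.Str.upper grades).toList (PySem.Str.upper grades).toList.length 0 0 ≤ 3)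
      = decide ((pvScan (PySem.Str.upper grades).toList 0 0 0 0).2.2.2 ≤ 3) := by
    rw [decide_eq_decide, h3]
    rcases hmain with hm | hm <;> rw [hm] <;> omega
  show (decide (PySem.Str.count (PySem.Str.upper grades) "D" < 5) &&
        decide (PySem.Str.count (PySem.Str.upper grades) "F" < 2) &&
        decide (pvOuter (PySem.Str.upper grades).toList (PySem.Str.upper grades).toList.length 0 0 ≤ 3))
      = (decide ((pvScan (PySem.Str.upper grades).toList 0 0 0 0).1 < 5) &&
         decide ((pvScan (PySem.Str.upper grades).toList 0 0 0 0).2.1 < 2) &&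
         decide ((pvScan (PySem.Str.upper grades).toList 0 0 0 0).2.2.2 ≤ 3))
  rw [b1, b2, b3]
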